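-- pv_equiv track=rewrite | github.com/karmaxa/test-bootcamp | app_booklist/views/helpers.py | author_parse
-- ===== SOURCE A (Python) =====
-- def author_parse(author: str) -> list:
--     author_list_many = [auth.split(";") for auth in author.split(",")]
--     author_list_pre: list = []
--     for item in author_list_many:
--         author_list_pre += item
--     author_list: list = []
--     for item in author_list_pre:
--         author_list.append(item.strip(" "))  # type: ignore
--     return author_list
-- ===== SOURCE B (Python) =====
-- def author_parse(author: str) -> list:
--     # One pass over the characters: cut at ',' or ';', strip spaces from each token.
--     tokens = []
--     cur = []
--     for ch in author:
--         if ch == "," or ch == ";":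
--             tokens.append("".join(cur).strip(" "))
--             cur = []
--         else:
--             cur.append(ch)
--     tokens.append("".join(cur).strip(" "))
--     return tokens
-- ===== Notes on version B (the rewrite author's own statement) =====
-- stated objective: alternative
-- what changed: A's nested comma-split, per-piece semicolon-split, explicit flatten loop and strip loop are replaced by a single character-level pass that cuts a token at each delimiter and strips spaces from each token as it is completed.
import Mathlib
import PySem

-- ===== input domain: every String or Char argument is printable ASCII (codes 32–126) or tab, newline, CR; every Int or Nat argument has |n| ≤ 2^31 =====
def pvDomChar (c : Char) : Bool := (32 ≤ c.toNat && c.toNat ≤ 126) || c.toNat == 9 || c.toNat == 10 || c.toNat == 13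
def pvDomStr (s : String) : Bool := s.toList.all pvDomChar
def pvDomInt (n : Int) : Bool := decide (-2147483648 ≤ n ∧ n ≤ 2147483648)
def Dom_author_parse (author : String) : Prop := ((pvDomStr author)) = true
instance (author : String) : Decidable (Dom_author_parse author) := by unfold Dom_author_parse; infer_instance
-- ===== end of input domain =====

-- B replaces A's nested split/flatten/strip passes by one character-level pass that cuts
-- a token at each delimiter and strips spaces from each finished token (objective: alternative).

-- ===== PORT A =====
def author_parse (author : String) : List String :=
  let author_list_many : List (List (List Char)) :=
    (PySem.Chars.splitOn author.toList ",".toList).map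
      (fun auth => PySem.Chars.splitOn auth ";".toList)
  let author_list_pre : List (List Char) :=
    author_list_many.foldl (fun acc item => acc ++ item) []
  let author_list : List String :=
    author_list_pre.foldl
      (fun acc item => acc ++ [String.ofList (PySem.Chars.stripChars item " ".toList)]) []
  author_list

-- ===== PORT B =====
def pvAltGo : List Char → List Char → List String
  | [], cur => [String.ofList (PySem.Chars.stripChars cur [' '])]
  | c :: rest, cur =>
      if c = ',' ∨ c = ';' then
        String.ofList (PySem.Chars.stripChars cur [' ']) :: pvAltGo rest []
      else
        pvAltGo rest (cur ++ [c])

def author_parse_alt (author : String) : List String := pvAltGo author.toList []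

-- ===== PRECONDITION & SPEC =====
def Spec_author_parse (author : String) (out : List String) : Prop := out = author_parse_alt author
instance (author : String) (out : List String) : Decidable (Spec_author_parse author out) := by unfold Spec_author_parse; infer_instance

-- ===== CLAIM (what is proved, stated in full; the proofs are below) =====
def Claim_equal_author_parse : Prop := ∀ (author : String), Dom_author_parse author → Spec_author_parse author (author_parse author)

-- ===== LEMMAS AND PROOFS =====

/-- Splitting a char list on a single delimiter, simple structural form. -/
def pvSplit1 (c : Char) : List Char → List (List Char)
  | [] => [[]]
  | a :: rest =>
      if a = c then [] :: pvSplit1 c rest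
      else
        match pvSplit1 c rest with
        | [] => [[a]]
        | t :: ts => (a :: t) :: ts

/-- Prepend chars onto the first piece. -/
def pvHeadCons (cur : List Char) : List (List Char) → List (List Char)
  | [] => [cur]
  | t :: ts => (cur ++ t) :: ts

/-- Split on both delimiters in one pass (B's token structure). -/
def pvSplit12 : List Char → List (List Char)
  | [] => [[]]
  | a :: rest =>
      if a = ',' ∨ a = ';' then [] :: pvSplit12 rest
      else
        match pvSplit12 rest with
        | [] => [[a]]
        | t :: ts => (a :: t) :: ts

theorem pvFlatten_singleton {α β : Type} (f : α → β) (l : List α) :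
    (l.map (fun x => [f x])).flatten = l.map f := by
  induction l <;> simp_all

theorem pvSplit1_ne_nil (c : Char) (l : List Char) : pvSplit1 c l ≠ [] := by
  cases l with
  | nil => simp [pvSplit1]
  | cons a rest =>
    simp only [pvSplit1]
    split
    · simp
    · cases h : pvSplit1 c rest <;> simp

theorem pvSplit12_ne_nil (l : List Char) : pvSplit12 l ≠ [] := by
  cases l with
  | nil => simp [pvSplit12]
  | cons a rest =>
    simp only [pvSplit12]
    split
    · simp
    · cases h : pvSplit12 rest <;> simp

/-- The fuelled `splitOn.go` computed in closed form for a single-char separator. -/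
theorem pvGo_eq (c : Char) (fuel : Nat) (l cur : List Char) (acc : List (List Char))
    (hf : l.length ≤ fuel) :
    PySem.Chars.splitOn.go [c] fuel l cur acc
      = acc.reverse ++ pvHeadCons cur.reverse (pvSplit1 c l) := by
  induction fuel generalizing l cur acc with
  | zero =>
    have : l = [] := List.length_eq_zero_iff.mp (Nat.le_zero.mp hf)
    subst this
    simp [PySem.Chars.splitOn.go, pvSplit1, pvHeadCons]
  | succ n ih =>
    cases l with
    | nil => simp [PySem.Chars.splitOn.go, pvSplit1, pvHeadCons]
    | cons a rest =>
      have hrest : rest.length ≤ n := by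
        simpa using Nat.le_of_succ_le_succ hf
      by_cases hac : a = c
      · subst hac
        have hpre : List.isPrefixOf [a] (a :: rest) = true := by
          simp [List.isPrefixOf]
        rw [show PySem.Chars.splitOn.go [a] (n+1) (a :: rest) cur acc
              = PySem.Chars.splitOn.go [a] n (List.drop (List.length [a]) (a :: rest)) []
                  (cur.reverse :: acc) by
              simp [PySem.Chars.splitOn.go, hpre]]
        rw [ih (List.drop (List.length [a]) (a :: rest)) [] (cur.reverse :: acc)
              (by simpa using hrest)]
        simp only [List.length_cons, List.length_nil, List.drop_succ_cons, List.drop_zero,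
          List.reverse_nil, List.reverse_cons, List.reverse_append, pvSplit1, if_pos rfl]
        cases h : pvSplit1 a rest with
        | nil => exact absurd h (pvSplit1_ne_nil a rest)
        | cons t ts => simp [pvHeadCons]
      · have hpre : List.isPrefixOf [c] (a :: rest) = false := by
          simp [List.isPrefixOf]
          exact fun h => absurd h.symm hac
        rw [show PySem.Chars.splitOn.go [c] (n+1) (a :: rest) cur acc
              = PySem.Chars.splitOn.go [c] n rest (a :: cur) acc by
              simp [PySem.Chars.splitOn.go, hpre]]
        rw [ih rest (a :: cur) acc hrest]
        congr 1
        simp only [pvSplit1, if_neg hac]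
        cases h : pvSplit1 c rest with
        | nil => exact absurd h (pvSplit1_ne_nil c rest)
        | cons t ts => simp [pvHeadCons]

theorem pvSplitOn_single (c : Char) (s : List Char) :
    PySem.Chars.splitOn s [c] = pvSplit1 c s := by
  rw [PySem.Chars.splitOn, pvGo_eq c (s.length + 1) s [] [] (Nat.le_succ _)]
  cases h : pvSplit1 c s with
  | nil => exact absurd h (pvSplit1_ne_nil c s)
  | cons t ts => simp [pvHeadCons]

theorem pvFoldl_append_eq_flatten (l : List (List (List Char))) (acc : List (List Char)) :
    l.foldl (fun acc item => acc ++ item) acc = acc ++ l.flatten := by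
  induction l generalizing acc with
  | nil => simp
  | cons t ts ih => simp [ih, List.append_assoc]

/-- One combined pass equals comma-split then semicolon-split, flattened. -/
theorem pvSplit12_eq (l : List Char) :
    pvSplit12 l = ((pvSplit1 ',' l).map (pvSplit1 ';')).flatten := by
  induction l with
  | nil => simp [pvSplit12, pvSplit1]
  | cons a rest ih =>
    by_cases hc : a = ','
    · subst hc
      simp [pvSplit12, pvSplit1, ih]
    · by_cases hs : a = ';'
      · subst hs
        cases h : pvSplit1 ',' rest with
        | nil => exact absurd h (pvSplit1_ne_nil ',' rest)
        | cons t ts =>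
          have h12 : pvSplit12 (';' :: rest) = [] :: pvSplit12 rest := by
            simp [pvSplit12]
          rw [h12, ih, h]
          simp [pvSplit1, h, hc]
      · cases h : pvSplit1 ',' rest with
        | nil => exact absurd h (pvSplit1_ne_nil ',' rest)
        | cons t ts =>
          have h12 : pvSplit12 (a :: rest) =
              match pvSplit12 rest with
              | [] => [[a]]
              | t :: ts => (a :: t) :: ts := by
            simp [pvSplit12, hc, hs]
          rw [h12, ih, h]
          cases h2 : pvSplit1 ';' t with
          | nil => exact absurd h2 (pvSplit1_ne_nil ';' t)
          | cons u us =>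
            simp [pvSplit1, hc, hs, h, h2, List.map_cons, List.flatten_cons]

/-- B's loop in closed form. -/
theorem pvAltGo_eq (l cur : List Char) :
    pvAltGo l cur
      = (pvHeadCons cur (pvSplit12 l)).map
          (fun item => String.ofList (PySem.Chars.stripChars item [' '])) := by
  induction l generalizing cur with
  | nil => simp [pvAltGo, pvSplit12, pvHeadCons]
  | cons a rest ih =>
    by_cases hd : a = ',' ∨ a = ';'
    · have h12 : pvSplit12 (a :: rest) = [] :: pvSplit12 rest := by
        simp [pvSplit12, hd]
      simp only [pvAltGo, if_pos hd, h12, pvHeadCons, ih]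
      cases h : pvSplit12 rest with
      | nil => exact absurd h (pvSplit12_ne_nil rest)
      | cons t ts => simp [pvHeadCons]
    · have hc : ¬ a = ',' := fun h => hd (Or.inl h)
      have hs : ¬ a = ';' := fun h => hd (Or.inr h)
      cases h : pvSplit12 rest with
      | nil => exact absurd h (pvSplit12_ne_nil rest)
      | cons t ts =>
        have h12 : pvSplit12 (a :: rest) = (a :: t) :: ts := by
          simp [pvSplit12, hc, hs, h]
        simp only [pvAltGo, if_neg hd, h12, pvHeadCons, ih, h]
        simp

-- ===== VERDICT (by name: the statement is the Claim_ definition above) =====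
theorem author_parse_spec : Claim_equal_author_parse := by
  intro author _
  show author_parse author = author_parse_alt author
  unfold author_parse author_parse_alt
  rw [pvAltGo_eq]
  simp only [show (",".toList) = [','] from rfl, show (";".toList) = [';'] from rfl,
    show (" ".toList) = [' '] from rfl, pvSplitOn_single, pvFoldl_append_eq_flatten,
    List.nil_append]
  rw [pvSplit12_eq]
  cases h : ((pvSplit1 ',' author.toList).map (pvSplit1 ';')).flatten with
  | nil => exact absurd ((pvSplit12_eq author.toList).trans h) (pvSplit12_ne_nil author.toList)
  | cons t ts =>
    simp [pvHeadCons]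
    exact pvFlatten_singleton (fun x => String.ofList (PySem.Chars.stripChars x [' '])) ts
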